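-- pv_equiv track=rewrite | github.com/MJebran/Linear-Programming-LP-using-Plup | lp.py | find_min_cut
-- ===== SOURCE A (Python) =====
-- def find_min_cut(graph, capacities, flow_solution, source):
--     residual_graph = {}
--     for (u, v), capacity in capacities.items():
--         flow = flow_solution.get((u, v), 0)
--         if capacity - flow > 0:
--             residual_graph.setdefault(u, []).append(v)
--         if flow > 0:
--             residual_graph.setdefault(v, []).append(u)
--
--     reachable = set()
--     stack = [source]
--     while stack:
--         node = stack.pop()
--         if node in reachable:
--             continue
--         reachable.add(node)
--         for neighbor in residual_graph.get(node, []):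
--             if neighbor not in reachable:
--                 stack.append(neighbor)
--
--     min_cut = []
--     for u, v in graph:
--         if u in reachable and v not in reachable:
--             min_cut.append((u, v))
--
--     return min_cut
-- ===== SOURCE B (Python) =====
-- def find_min_cut(graph, capacities, flow_solution, source):
--     arcs = []
--     for (u, v), capacity in capacities.items():
--         flow = flow_solution.get((u, v), 0)
--         if capacity - flow > 0:
--             arcs.append((u, v))
--         if flow > 0:
--             arcs.append((v, u))
--
--     reachable = {source}
--     changed = True
--     while changed:
--         changed = False
--         for a, b in arcs:
--             if a in reachable and b not in reachable:
--                 reachable.add(b)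
--                 changed = True
--
--     return [(u, v) for u, v in graph if u in reachable and v not in reachable]
-- ===== Notes on version B (the rewrite author's own statement) =====
-- stated objective: alternative
-- what changed: Replaces the adjacency-dict plus explicit-stack DFS with a flat list of residual arcs saturated to a fixpoint (repeated full passes that add the head of any arc leaving the current reachable set), and a comprehension for the final cut scan; the reachable set is the same because both compute exactly the nodes reachable from source in the residual graph.
import Mathlib
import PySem

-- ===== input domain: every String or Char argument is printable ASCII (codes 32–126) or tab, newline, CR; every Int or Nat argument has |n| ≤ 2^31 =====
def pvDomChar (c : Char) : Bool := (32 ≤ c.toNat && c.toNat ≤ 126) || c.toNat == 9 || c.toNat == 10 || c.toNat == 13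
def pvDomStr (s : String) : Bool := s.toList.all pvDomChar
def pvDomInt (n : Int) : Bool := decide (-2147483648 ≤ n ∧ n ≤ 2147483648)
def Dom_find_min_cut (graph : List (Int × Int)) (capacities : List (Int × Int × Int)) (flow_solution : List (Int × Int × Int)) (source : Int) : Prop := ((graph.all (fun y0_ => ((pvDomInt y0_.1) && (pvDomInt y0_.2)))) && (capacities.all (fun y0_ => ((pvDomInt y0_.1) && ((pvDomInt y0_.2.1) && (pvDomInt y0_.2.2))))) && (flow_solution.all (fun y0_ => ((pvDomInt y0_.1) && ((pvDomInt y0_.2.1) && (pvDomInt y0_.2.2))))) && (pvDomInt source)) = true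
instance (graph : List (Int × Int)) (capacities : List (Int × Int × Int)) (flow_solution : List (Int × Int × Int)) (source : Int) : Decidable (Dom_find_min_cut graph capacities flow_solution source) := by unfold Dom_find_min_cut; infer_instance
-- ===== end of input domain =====

-- B replaces the adjacency-dict + explicit-stack DFS by a flat residual-arc list saturated to a
-- fixpoint; same reachable set, hence the same min-cut list (objective: alternative algorithm).

-- ===== PORT A =====
-- flow_solution.get((u, v), 0): first match in the assoc list (the dict's items), else 0.
-- Both Pythons contain this identical lookup expression, so both ports share this helper.
def pvFlowGet (fs : List (Int × Int × Int)) (u v : Int) : Int :=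
  match fs with
  | [] => 0
  | t :: rest => if t.1 = u ∧ t.2.1 = v then t.2.2 else pvFlowGet rest u v

-- the residual_graph-building loop of A (setdefault(u, []).append(v) = Dict.modify u [] (· ++ [v]))
def pvResidual (capacities flow_solution : List (Int × Int × Int)) : PySem.Dict Int (List Int) :=
  capacities.foldl (fun d t =>
    let flow := pvFlowGet flow_solution t.1 t.2.1
    let d1 := if t.2.2 - flow > 0 then d.modify t.1 [] (fun l => l ++ [t.2.1]) else d
    if flow > 0 then d1.modify t.2.1 [] (fun l => l ++ [t.1]) else d1) PySem.Dict.empty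

-- termination measure of A's while-loop: |stack| + Σ of adjacency-list lengths over unvisited keys
def pvMu (adj : PySem.Dict Int (List Int)) (stack : List Int) (reach : PySem.Set Int) : Nat :=
  stack.length +
    ((adj.items.filter (fun kv => !reach.contains kv.1)).map (fun kv => kv.2.length)).sum

lemma pvContains_iff (s : PySem.Set Int) (x : Int) : s.contains x = true ↔ x ∈ s := by
  simp [PySem.Set.contains]

lemma pvContains_add (s : PySem.Set Int) (node x : Int) :
    (s.add node).contains x = (s.contains x || decide (x = node)) := by
  simp only [PySem.Set.contains, List.contains_eq_mem, ← Bool.decide_or]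
  rw [decide_eq_decide]
  exact PySem.Set.mem_add s node x

lemma pvSum_mono (items : List (Int × List Int)) (reach : PySem.Set Int) (node : Int) :
    ((items.filter (fun kv => !(reach.add node).contains kv.1)).map (fun kv => kv.2.length)).sum ≤
    ((items.filter (fun kv => !reach.contains kv.1)).map (fun kv => kv.2.length)).sum := by
  have hsub : (items.filter (fun kv => !(reach.add node).contains kv.1)).Sublist
      (items.filter (fun kv => !reach.contains kv.1)) := by
    apply List.monotone_filter_right
    intro kv h
    rw [pvContains_add] at h
    simp only [Bool.not_or] at h
    exact (Bool.and_elim_left h)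
  exact (hsub.map (fun kv => kv.2.length)).sum_le_sum (by intro x _; positivity)

lemma pvSum_drop (items : List (Int × List Int)) (reach : PySem.Set Int) (node : Int)
    (hn : reach.contains node = false) :
    ((items.filter (fun kv => !(reach.add node).contains kv.1)).map (fun kv => kv.2.length)).sum +
      (((items.find? (fun p => p.1 == node)).map (fun p => p.2)).getD []).length ≤
    ((items.filter (fun kv => !reach.contains kv.1)).map (fun kv => kv.2.length)).sum := by
  induction items with
  | nil => simp
  | cons kv rest ih =>
    obtain ⟨k, vs⟩ := kv
    by_cases hk : k = node
    · subst hk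
      rw [List.filter_cons, List.filter_cons, List.find?_cons_of_pos (by simp)]
      have hc1 : (!reach.contains (k, vs).1) = true := by
        show (!reach.contains k) = true
        rw [hn]; rfl
      have hc2 : (!(reach.add k).contains (k, vs).1) = false := by
        rw [pvContains_add]; simp
      rw [hc1, hc2]
      simp only [Bool.false_eq_true, if_false, if_true, Option.map_some, Option.getD_some,
        List.map_cons, List.sum_cons]
      have := pvSum_mono rest reach k
      omega
    · have heq : (reach.add node).contains (k, vs).1 = reach.contains (k, vs).1 := by
        rw [pvContains_add]; simp [hk]
      rw [List.filter_cons, List.filter_cons, List.find?_cons_of_neg (by simpa using hk), heq]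
      cases hc : reach.contains (k, vs).1 with
      | false =>
        simp only [Bool.not_false, if_true, List.map_cons, List.sum_cons]
        omega
      | true =>
        simp only [Bool.not_true, Bool.false_eq_true, if_false]
        exact ih

lemma pvPushLen (l : List Int) (p : Int → Bool) :
    ∀ init : List Int,
      (l.foldl (fun s n => if p n then s else n :: s) init).length ≤ init.length + l.length := by
  induction l with
  | nil => intro init; simp
  | cons x rest ih =>
    intro init
    cases hpx : p x <;> simp only [List.foldl_cons, hpx, Bool.false_eq_true, if_false, if_true]
    · have := ih (x :: init)
      simp only [List.length_cons] at *; omega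
    · have := ih init
      simp only [List.length_cons]; omega

lemma pvMu_fresh_lt (adj : PySem.Dict Int (List Int)) (node : Int) (rest : List Int)
    (reach : PySem.Set Int) (h : reach.contains node = false) :
    pvMu adj ((adj.getD node []).foldl
        (fun s n => if (reach.add node).contains n then s else n :: s) rest) (reach.add node) <
      pvMu adj (node :: rest) reach := by
  have hlen := pvPushLen (adj.getD node []) (fun n => (reach.add node).contains n) rest
  have hdrop := pvSum_drop adj.items reach node h
  have hgetD : adj.getD node [] = ((adj.items.find? (fun p => p.1 == node)).map (fun p => p.2)).getD [] := by
    simp [PySem.Dict.getD, PySem.Dict.get?]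
  rw [← hgetD] at hdrop
  simp only [pvMu, List.length_cons]
  omega

-- the while-stack DFS loop of A (Python's stack kept reversed: append = cons, pop() = head)
def pvDFS (adj : PySem.Dict Int (List Int)) (stack : List Int) (reach : PySem.Set Int) :
    PySem.Set Int :=
  match stack with
  | [] => reach
  | node :: rest =>
    if h : reach.contains node then pvDFS adj rest reach
    else
      pvDFS adj
        ((adj.getD node []).foldl
          (fun s n => if (reach.add node).contains n then s else n :: s) rest)
        (reach.add node)
termination_by pvMu adj stack reach
decreasing_by
  · simp [pvMu]
  · exact pvMu_fresh_lt adj node rest reach (by simpa using h)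

def find_min_cut (graph : List (Int × Int)) (capacities : List (Int × Int × Int)) (flow_solution : List (Int × Int × Int)) (source : Int) : List (Int × Int) :=
  let residual_graph := pvResidual capacities flow_solution
  let reachable := pvDFS residual_graph [source] PySem.Set.empty
  graph.foldl (fun min_cut uv =>
    if reachable.contains uv.1 && !reachable.contains uv.2 then min_cut ++ [uv] else min_cut) []

-- ===== PORT B =====
-- the residual-arc-collecting loop of B
def pvArcs (capacities flow_solution : List (Int × Int × Int)) : List (Int × Int) :=
  capacities.foldl (fun arcs t =>
    let flow := pvFlowGet flow_solution t.1 t.2.1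
    let a1 := if t.2.2 - flow > 0 then arcs ++ [(t.1, t.2.1)] else arcs
    if flow > 0 then a1 ++ [(t.2.1, t.1)] else a1) []

-- body of B's inner for-loop over arcs
def pvPassStep (rc : PySem.Set Int × Bool) (ab : Int × Int) : PySem.Set Int × Bool :=
  if rc.1.contains ab.1 && !rc.1.contains ab.2 then (rc.1.add ab.2, true) else rc

-- one pass of B's while-body: scan all arcs once, starting with changed = False
def pvPass (arcs : List (Int × Int)) (reach : PySem.Set Int) : PySem.Set Int × Bool :=
  arcs.foldl pvPassStep (reach, false)

lemma pvPassStep_sub (s : PySem.Set Int × Bool) (ab : Int × Int) (x : Int) (hx : x ∈ s.1) :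
    x ∈ (pvPassStep s ab).1 := by
  unfold pvPassStep
  split
  · exact (PySem.Set.mem_add s.1 ab.2 x).2 (Or.inl hx)
  · exact hx

lemma pvFold_sub (arcs : List (Int × Int)) :
    ∀ (s : PySem.Set Int × Bool) (x : Int), x ∈ s.1 → x ∈ (arcs.foldl pvPassStep s).1 := by
  induction arcs with
  | nil => intro s x hx; exact hx
  | cons ab rest ih =>
    intro s x hx
    exact ih (pvPassStep s ab) x (pvPassStep_sub s ab x hx)

lemma pvFold_witness (arcs : List (Int × Int)) :
    ∀ (s : PySem.Set Int × Bool), s.2 = false → (arcs.foldl pvPassStep s).2 = true →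
      ∃ b, b ∈ arcs.map (fun ab => ab.2) ∧ b ∉ s.1 ∧ b ∈ (arcs.foldl pvPassStep s).1 := by
  induction arcs with
  | nil => intro s h1 h2; rw [List.foldl_nil] at h2; rw [h1] at h2; exact absurd h2 (by simp)
  | cons ab rest ih =>
    intro s h1 h2
    rw [List.foldl_cons] at h2 ⊢
    by_cases hf : (s.1.contains ab.1 && !s.1.contains ab.2) = true
    · refine ⟨ab.2, by simp, ?_, ?_⟩
      · simp only [Bool.and_eq_true, Bool.not_eq_true'] at hf
        intro habs
        have h := (pvContains_iff s.1 ab.2).2 habs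
        rw [hf.2] at h
        exact Bool.false_ne_true h
      · apply pvFold_sub
        unfold pvPassStep
        rw [if_pos hf]
        exact (PySem.Set.mem_add s.1 ab.2 ab.2).2 (Or.inr rfl)
    · have hstep : pvPassStep s ab = s := by unfold pvPassStep; rw [if_neg hf]
      rw [hstep] at h2 ⊢
      obtain ⟨b, hb1, hb2, hb3⟩ := ih s h1 h2
      exact ⟨b, by simp [hb1], hb2, hb3⟩

lemma pvFilter_lt (l : List Int) (p p' : Int → Bool) (hmono : ∀ x, p' x = true → p x = true)
    (b : Int) (hb : b ∈ l) (hpb : p b = true) (hp'b : p' b = false) :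
    (l.filter p').length < (l.filter p).length := by
  induction l with
  | nil => cases hb
  | cons a rest ih =>
    have hrest : (rest.filter p').length ≤ (rest.filter p).length :=
      (List.monotone_filter_right rest hmono).length_le
    rw [List.filter_cons, List.filter_cons]
    rcases List.mem_cons.1 hb with rfl | hb'
    · rw [hpb, hp'b]
      simp only [Bool.false_eq_true, if_false, if_true, List.length_cons]
      omega
    · have hlt := fun h => ih h
      by_cases hpa : p a = true
      · rw [hpa]
        cases hp'a : p' a with
        | true =>
          simp only [if_true, List.length_cons]
          exact Nat.succ_lt_succ (ih hb')
        | false =>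
          simp only [Bool.false_eq_true, if_false, if_true, List.length_cons]
          exact Nat.lt_succ_of_lt (ih hb')
      · have hp'a : p' a = false := by
          cases h2 : p' a
          · rfl
          · exact absurd (hmono a h2) hpa
        rw [hp'a]
        have hpa' : p a = false := by
          cases h2 : p a
          · rfl
          · exact absurd h2 hpa
        rw [hpa']
        simp only [Bool.false_eq_true, if_false]
        exact ih hb'

lemma pvPass_progress (arcs : List (Int × Int)) (reach : PySem.Set Int)
    (h : (pvPass arcs reach).2 = true) :
    (((arcs.map (fun ab => ab.2)).filter (fun b => !(pvPass arcs reach).1.contains b)).length <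
      ((arcs.map (fun ab => ab.2)).filter (fun b => !reach.contains b)).length) := by
  obtain ⟨b, hb1, hb2, hb3⟩ := pvFold_witness arcs (reach, false) rfl h
  apply pvFilter_lt _ _ _ ?_ b hb1 ?_ ?_
  · intro x hx
    rw [Bool.not_eq_true'] at hx ⊢
    rw [← Bool.not_eq_true] at hx ⊢
    intro habs
    exact hx ((pvContains_iff _ x).2 (pvFold_sub arcs (reach, false) x ((pvContains_iff _ x).1 habs)))
  · rw [Bool.not_eq_true']
    rw [← Bool.not_eq_true]
    intro habs
    exact hb2 ((pvContains_iff _ b).1 habs)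
  · rw [Bool.not_eq_false']
    exact (pvContains_iff _ b).2 hb3

-- B's while changed loop
def pvSaturate (arcs : List (Int × Int)) (reach : PySem.Set Int) : PySem.Set Int :=
  let rc := pvPass arcs reach
  if h : rc.2 then pvSaturate arcs rc.1 else rc.1
termination_by ((arcs.map (fun ab => ab.2)).filter (fun b => !reach.contains b)).length
decreasing_by
  exact pvPass_progress arcs reach h

def find_min_cut_alt (graph : List (Int × Int)) (capacities : List (Int × Int × Int)) (flow_solution : List (Int × Int × Int)) (source : Int) : List (Int × Int) :=
  let arcs := pvArcs capacities flow_solution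
  let reachable := pvSaturate arcs (PySem.Set.ofList [source])
  graph.filter (fun uv => reachable.contains uv.1 && !reachable.contains uv.2)

-- ===== PRECONDITION & SPEC =====
def Spec_find_min_cut (graph : List (Int × Int)) (capacities : List (Int × Int × Int)) (flow_solution : List (Int × Int × Int)) (source : Int) (out : List (Int × Int)) : Prop := out = find_min_cut_alt graph capacities flow_solution source
instance (graph : List (Int × Int)) (capacities : List (Int × Int × Int)) (flow_solution : List (Int × Int × Int)) (source : Int) (out : List (Int × Int)) : Decidable (Spec_find_min_cut graph capacities flow_solution source out) := by unfold Spec_find_min_cut; infer_instance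

-- ===== CLAIM (what is proved, stated in full; the proofs are below) =====
def Claim_equal_find_min_cut : Prop := ∀ (graph : List (Int × Int)) (capacities : List (Int × Int × Int)) (flow_solution : List (Int × Int × Int)) (source : Int), Dom_find_min_cut graph capacities flow_solution source → Spec_find_min_cut graph capacities flow_solution source (find_min_cut graph capacities flow_solution source)

-- ===== LEMMAS AND PROOFS =====

lemma pvFold_true (arcs : List (Int × Int)) :
    ∀ (s : PySem.Set Int × Bool), s.2 = true → (arcs.foldl pvPassStep s).2 = true := by
  induction arcs with
  | nil => intro s h; exact h
  | cons ab rest ih =>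
    intro s h
    apply ih
    unfold pvPassStep
    split
    · rfl
    · exact h

lemma pvFold_nochange (arcs : List (Int × Int)) :
    ∀ (s : PySem.Set Int × Bool), (arcs.foldl pvPassStep s).2 = false →
      (arcs.foldl pvPassStep s).1 = s.1 ∧
      ∀ ab ∈ arcs, ab.1 ∈ s.1 → ab.2 ∈ s.1 := by
  induction arcs with
  | nil => intro s _; exact ⟨rfl, by simp⟩
  | cons ab rest ih =>
    intro s h
    rw [List.foldl_cons] at h ⊢
    by_cases hf : (s.1.contains ab.1 && !s.1.contains ab.2) = true
    · exfalso
      have : (pvPassStep s ab).2 = true := by unfold pvPassStep; rw [if_pos hf]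
      have := pvFold_true rest _ this
      rw [this] at h; exact Bool.true_eq_false.mp h
    · have hstep : pvPassStep s ab = s := by unfold pvPassStep; rw [if_neg hf]
      rw [hstep] at h ⊢
      obtain ⟨h1, h2⟩ := ih s h
      refine ⟨h1, ?_⟩
      intro cd hcd hc
      rcases List.mem_cons.1 hcd with rfl | hcd'
      · simp only [Bool.and_eq_true, Bool.not_eq_true'] at hf
        by_cases hb : cd.2 ∈ s.1
        · exact hb
        · exfalso; apply hf
          refine ⟨(pvContains_iff s.1 cd.1).2 hc, ?_⟩
          rw [← Bool.not_eq_true]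
          intro habs
          exact hb ((pvContains_iff s.1 cd.2).1 habs)
      · exact h2 cd hcd' hc

-- one step through the residual adjacency dict
def pvStep (adj : PySem.Dict Int (List Int)) (a b : Int) : Prop := b ∈ adj.getD a []

lemma pvPush_init_sub (l : List Int) (p : Int → Bool) (init : List Int) (x : Int) (hx : x ∈ init) :
    x ∈ l.foldl (fun s n => if p n then s else n :: s) init := by
  induction l generalizing init with
  | nil => exact hx
  | cons y rest ih =>
    rw [List.foldl_cons]
    apply ih
    split
    · exact hx
    · exact List.mem_cons_of_mem _ hx

lemma pvPush_mem_of (l : List Int) (p : Int → Bool) (init : List Int) (y : Int) (hy : y ∈ l) :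
    p y = true ∨ y ∈ l.foldl (fun s n => if p n then s else n :: s) init := by
  induction l generalizing init with
  | nil => cases hy
  | cons z rest ih =>
    rw [List.foldl_cons]
    rcases List.mem_cons.1 hy with rfl | hy'
    · by_cases hp : p y = true
      · exact Or.inl hp
      · right
        rw [if_neg hp]
        exact pvPush_init_sub rest p (y :: init) y List.mem_cons_self
    · exact ih _ hy'

lemma pvPush_sub (l : List Int) (p : Int → Bool) (init : List Int) (x : Int)
    (hx : x ∈ l.foldl (fun s n => if p n then s else n :: s) init) : x ∈ init ∨ x ∈ l := by
  induction l generalizing init with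
  | nil => exact Or.inl hx
  | cons y rest ih =>
    rw [List.foldl_cons] at hx
    rcases ih _ hx with h | h
    · split at h
      · exact Or.inl h
      · rcases List.mem_cons.1 h with rfl | h'
        · exact Or.inr List.mem_cons_self
        · exact Or.inl h'
    · exact Or.inr (List.mem_cons_of_mem _ h)

lemma pvDFS_nil (adj : PySem.Dict Int (List Int)) (reach : PySem.Set Int) :
    pvDFS adj [] reach = reach := by
  rw [pvDFS]

lemma pvDFS_cons_mem (adj : PySem.Dict Int (List Int)) (node : Int) (rest : List Int)
    (reach : PySem.Set Int) (h : reach.contains node = true) :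
    pvDFS adj (node :: rest) reach = pvDFS adj rest reach := by
  rw [pvDFS, dif_pos h]

lemma pvDFS_cons_new (adj : PySem.Dict Int (List Int)) (node : Int) (rest : List Int)
    (reach : PySem.Set Int) (h : ¬ reach.contains node = true) :
    pvDFS adj (node :: rest) reach =
      pvDFS adj
        ((adj.getD node []).foldl
          (fun s n => if (reach.add node).contains n then s else n :: s) rest)
        (reach.add node) := by
  rw [pvDFS, dif_neg h]

lemma pvDFS_grows (adj : PySem.Dict Int (List Int)) (stack : List Int) (reach : PySem.Set Int)
    (x : Int) (hx : x ∈ reach ∨ x ∈ stack) : x ∈ pvDFS adj stack reach := by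
  induction stack, reach using pvDFS.induct adj with
  | case1 reach =>
    rw [pvDFS_nil]
    rcases hx with h | h
    · exact h
    · cases h
  | case2 reach node rest hcont ih =>
    rw [pvDFS_cons_mem adj node rest reach hcont]
    apply ih
    rcases hx with h | h
    · exact Or.inl h
    · rcases List.mem_cons.1 h with rfl | h'
      · exact Or.inl ((pvContains_iff reach x).1 hcont)
      · exact Or.inr h'
  | case3 reach node rest hcont ih =>
    rw [pvDFS_cons_new adj node rest reach hcont]
    apply ih
    rcases hx with h | h
    · exact Or.inl ((PySem.Set.mem_add reach node x).2 (Or.inl h))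
    · rcases List.mem_cons.1 h with rfl | h'
      · exact Or.inl ((PySem.Set.mem_add reach x x).2 (Or.inr rfl))
      · exact Or.inr (pvPush_init_sub _ _ rest x h')

lemma pvDFS_closed (adj : PySem.Dict Int (List Int)) (stack : List Int) (reach : PySem.Set Int)
    (hinv : ∀ r ∈ reach, ∀ y ∈ adj.getD r [], y ∈ reach ∨ y ∈ stack) :
    ∀ r ∈ pvDFS adj stack reach, ∀ y ∈ adj.getD r [], y ∈ pvDFS adj stack reach := by
  induction stack, reach using pvDFS.induct adj with
  | case1 reach =>
    rw [pvDFS_nil]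
    intro r hr y hy
    rcases hinv r hr y hy with h | h
    · exact h
    · cases h
  | case2 reach node rest hcont ih =>
    rw [pvDFS_cons_mem adj node rest reach hcont]
    apply ih
    intro r hr y hy
    rcases hinv r hr y hy with h | h
    · exact Or.inl h
    · rcases List.mem_cons.1 h with rfl | h'
      · exact Or.inl ((pvContains_iff reach y).1 hcont)
      · exact Or.inr h'
  | case3 reach node rest hcont ih =>
    rw [pvDFS_cons_new adj node rest reach hcont]
    apply ih
    intro r hr y hy
    rcases (PySem.Set.mem_add reach node r).1 hr with hr' | rfl
    · rcases hinv r hr' y hy with h | h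
      · exact Or.inl ((PySem.Set.mem_add reach node y).2 (Or.inl h))
      · rcases List.mem_cons.1 h with rfl | h'
        · exact Or.inl ((PySem.Set.mem_add reach y y).2 (Or.inr rfl))
        · exact Or.inr (pvPush_init_sub _ _ rest y h')
    · rcases pvPush_mem_of (adj.getD r []) (fun n => (reach.add r).contains n) rest y hy with hp | hmem
      · exact Or.inl ((pvContains_iff _ y).1 hp)
      · exact Or.inr hmem

lemma pvDFS_bound (adj : PySem.Dict Int (List Int)) (stack : List Int) (reach : PySem.Set Int) :
    ∀ x ∈ pvDFS adj stack reach,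
      ∃ s, (s ∈ reach ∨ s ∈ stack) ∧ Relation.ReflTransGen (pvStep adj) s x := by
  induction stack, reach using pvDFS.induct adj with
  | case1 reach =>
    rw [pvDFS_nil]
    intro x hx
    exact ⟨x, Or.inl hx, Relation.ReflTransGen.refl⟩
  | case2 reach node rest hcont ih =>
    rw [pvDFS_cons_mem adj node rest reach hcont]
    intro x hx
    obtain ⟨s, hs, hr⟩ := ih x hx
    rcases hs with h | h
    · exact ⟨s, Or.inl h, hr⟩
    · exact ⟨s, Or.inr (List.mem_cons_of_mem _ h), hr⟩
  | case3 reach node rest hcont ih =>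
    rw [pvDFS_cons_new adj node rest reach hcont]
    intro x hx
    obtain ⟨s, hs, hr⟩ := ih x hx
    rcases hs with h | h
    · rcases (PySem.Set.mem_add reach node s).1 h with h' | rfl
      · exact ⟨s, Or.inl h', hr⟩
      · exact ⟨s, Or.inr List.mem_cons_self, hr⟩
    · rcases pvPush_sub _ _ rest s h with h' | h'
      · exact ⟨s, Or.inr (List.mem_cons_of_mem _ h'), hr⟩
      · exact ⟨node, Or.inr List.mem_cons_self, Relation.ReflTransGen.head h' hr⟩

lemma pvDFS_iff (adj : PySem.Dict Int (List Int)) (source x : Int) :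
    x ∈ pvDFS adj [source] PySem.Set.empty ↔ Relation.ReflTransGen (pvStep adj) source x := by
  constructor
  · intro hx
    obtain ⟨s, hs, hr⟩ := pvDFS_bound adj [source] PySem.Set.empty x hx
    rcases hs with h | h
    · cases h
    · rcases List.mem_singleton.1 h with rfl
      exact hr
  · intro hr
    induction hr with
    | refl => exact pvDFS_grows adj [source] PySem.Set.empty source (Or.inr (List.mem_singleton.2 rfl))
    | tail _ hstep ih =>
      exact pvDFS_closed adj [source] PySem.Set.empty (by intro r hr; cases hr) _ ih _ hstep

lemma pvGetD_modify (d : PySem.Dict Int (List Int)) (u v a : Int) :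
    (d.modify u [] (fun l => l ++ [v])).getD a [] =
      if a = u then d.getD u [] ++ [v] else d.getD a [] := by
  simp [PySem.Dict.modify, PySem.Dict.getD_insert]

lemma pvInv_step (d : PySem.Dict Int (List Int)) (l : List (Int × Int)) (u v : Int)
    (hinv : ∀ a b : Int, b ∈ d.getD a [] ↔ (a, b) ∈ l) :
    ∀ a b : Int, b ∈ (d.modify u [] (fun vs => vs ++ [v])).getD a [] ↔ (a, b) ∈ l ++ [(u, v)] := by
  intro a b
  rw [pvGetD_modify]
  by_cases hau : a = u
  · subst hau
    rw [if_pos rfl]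
    simp only [List.mem_append, List.mem_singleton, hinv a b, Prod.mk.injEq, true_and]
  · rw [if_neg hau]
    simp only [List.mem_append, List.mem_singleton, hinv a b, Prod.mk.injEq]
    constructor
    · exact Or.inl
    · rintro (h | ⟨rfl, rfl⟩)
      · exact h
      · exact absurd rfl hau

lemma pvBuild_aux (flow_solution : List (Int × Int × Int)) :
    ∀ (caps : List (Int × Int × Int)) (d : PySem.Dict Int (List Int)) (l : List (Int × Int)),
      (∀ a b : Int, b ∈ d.getD a [] ↔ (a, b) ∈ l) →
      ∀ a b : Int,
        b ∈ (caps.foldl (fun d t =>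
          let flow := pvFlowGet flow_solution t.1 t.2.1
          let d1 := if t.2.2 - flow > 0 then d.modify t.1 [] (fun l => l ++ [t.2.1]) else d
          if flow > 0 then d1.modify t.2.1 [] (fun l => l ++ [t.1]) else d1) d).getD a [] ↔
        (a, b) ∈ caps.foldl (fun arcs t =>
          let flow := pvFlowGet flow_solution t.1 t.2.1
          let a1 := if t.2.2 - flow > 0 then arcs ++ [(t.1, t.2.1)] else arcs
          if flow > 0 then a1 ++ [(t.2.1, t.1)] else a1) l := by
  intro caps
  induction caps with
  | nil => intro d l hinv a b; exact hinv a b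
  | cons t rest ih =>
    intro d l hinv a b
    rw [List.foldl_cons, List.foldl_cons]
    apply ih
    dsimp only
    by_cases h1 : t.2.2 - pvFlowGet flow_solution t.1 t.2.1 > 0 <;>
      by_cases h2 : pvFlowGet flow_solution t.1 t.2.1 > 0
    · rw [if_pos h1, if_pos h1, if_pos h2, if_pos h2]
      exact pvInv_step _ _ _ _ (pvInv_step d l t.1 t.2.1 hinv)
    · rw [if_pos h1, if_pos h1, if_neg h2, if_neg h2]
      exact pvInv_step d l t.1 t.2.1 hinv
    · rw [if_neg h1, if_neg h1, if_pos h2, if_pos h2]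
      exact pvInv_step d l t.2.1 t.1 hinv
    · rw [if_neg h1, if_neg h1, if_neg h2, if_neg h2]
      exact hinv
  
lemma pvArcs_residual (capacities flow_solution : List (Int × Int × Int)) (a b : Int) :
    pvStep (pvResidual capacities flow_solution) a b ↔
      (a, b) ∈ pvArcs capacities flow_solution := by
  unfold pvStep pvResidual pvArcs
  exact pvBuild_aux flow_solution capacities PySem.Dict.empty []
    (by intro a b; simp [PySem.Dict.getD, PySem.Dict.get?, PySem.Dict.empty]) a b

lemma pvSat_eq_true (arcs : List (Int × Int)) (reach : PySem.Set Int)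
    (h : (pvPass arcs reach).2 = true) :
    pvSaturate arcs reach = pvSaturate arcs (pvPass arcs reach).1 := by
  rw [pvSaturate]
  simp only [h, dif_pos]

lemma pvSat_eq_false (arcs : List (Int × Int)) (reach : PySem.Set Int)
    (h : (pvPass arcs reach).2 = false) :
    pvSaturate arcs reach = (pvPass arcs reach).1 := by
  rw [pvSaturate]
  simp only [h, Bool.false_eq_true, dif_neg, not_false_iff]

lemma pvSat_grows (arcs : List (Int × Int)) (reach : PySem.Set Int) (x : Int) (hx : x ∈ reach) :
    x ∈ pvSaturate arcs reach := by
  refine pvSaturate.induct arcs (fun r => x ∈ r → x ∈ pvSaturate arcs r) ?_ ?_ reach hx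
  · intro r rc h ih hx'
    rw [pvSat_eq_true arcs r h]
    exact ih (pvFold_sub arcs (r, false) x hx')
  · intro r rc h hx'
    rw [pvSat_eq_false arcs r (by simpa using h)]
    exact pvFold_sub arcs (r, false) x hx'

lemma pvSat_closed (arcs : List (Int × Int)) (reach : PySem.Set Int) :
    ∀ ab ∈ arcs, ab.1 ∈ pvSaturate arcs reach → ab.2 ∈ pvSaturate arcs reach := by
  refine pvSaturate.induct arcs
    (fun r => ∀ ab ∈ arcs, ab.1 ∈ pvSaturate arcs r → ab.2 ∈ pvSaturate arcs r) ?_ ?_ reach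
  · intro r rc h ih
    rw [pvSat_eq_true arcs r h]
    exact ih
  · intro r rc h
    have h' : (pvPass arcs r).2 = false := by simpa using h
    rw [pvSat_eq_false arcs r h']
    obtain ⟨heq, hcl⟩ := pvFold_nochange arcs (r, false) h'
    intro ab hab h1
    unfold pvPass at h1 ⊢
    rw [heq] at h1 ⊢
    exact hcl ab hab h1

lemma pvFold_rtg (A : List (Int × Int)) (R : PySem.Set Int) :
    ∀ (arcs : List (Int × Int)), (∀ ab ∈ arcs, ab ∈ A) →
    ∀ (s : PySem.Set Int × Bool),
      (∀ y ∈ s.1, ∃ u ∈ R, Relation.ReflTransGen (fun a b => (a, b) ∈ A) u y) →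
    ∀ t ∈ (arcs.foldl pvPassStep s).1,
      ∃ u ∈ R, Relation.ReflTransGen (fun a b => (a, b) ∈ A) u t := by
  intro arcs
  induction arcs with
  | nil => intro _ s hs t ht; exact hs t ht
  | cons ab rest ih =>
    intro hsub s hs t ht
    rw [List.foldl_cons] at ht
    refine ih (fun cd hcd => hsub cd (List.mem_cons_of_mem _ hcd)) _ ?_ t ht
    intro y hy
    unfold pvPassStep at hy
    split at hy
    · rcases (PySem.Set.mem_add s.1 ab.2 y).1 hy with h | rfl
      · exact hs y h
      · rename_i hfire
        rw [Bool.and_eq_true] at hfire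
        obtain ⟨u, hu, hr⟩ := hs ab.1 ((pvContains_iff s.1 ab.1).1 hfire.1)
        exact ⟨u, hu, hr.tail (hsub ab List.mem_cons_self)⟩
    · exact hs y hy

lemma pvSat_bound (arcs : List (Int × Int)) (reach : PySem.Set Int) :
    ∀ x ∈ pvSaturate arcs reach,
      ∃ s ∈ reach, Relation.ReflTransGen (fun a b => (a, b) ∈ arcs) s x := by
  refine pvSaturate.induct arcs
    (fun r => ∀ x ∈ pvSaturate arcs r,
      ∃ s ∈ r, Relation.ReflTransGen (fun a b => (a, b) ∈ arcs) s x) ?_ ?_ reach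
  · intro r rc h ih x hx
    rw [pvSat_eq_true arcs r h] at hx
    obtain ⟨t, ht, htx⟩ := ih x hx
    obtain ⟨u, hu, hut⟩ := pvFold_rtg arcs r arcs (fun ab hab => hab) (r, false)
      (fun y hy => ⟨y, hy, Relation.ReflTransGen.refl⟩) t ht
    exact ⟨u, hu, hut.trans htx⟩
  · intro r rc h x hx
    have h' : (pvPass arcs r).2 = false := by simpa using h
    rw [pvSat_eq_false arcs r h'] at hx
    obtain ⟨heq, _⟩ := pvFold_nochange arcs (r, false) h'
    unfold pvPass at hx
    rw [heq] at hx
    exact ⟨x, hx, Relation.ReflTransGen.refl⟩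

lemma pvSat_iff (arcs : List (Int × Int)) (source x : Int) :
    x ∈ pvSaturate arcs (PySem.Set.ofList [source]) ↔
      Relation.ReflTransGen (fun a b => (a, b) ∈ arcs) source x := by
  constructor
  · intro hx
    obtain ⟨s, hs, hr⟩ := pvSat_bound arcs _ x hx
    rw [PySem.Set.mem_ofList] at hs
    rcases List.mem_singleton.1 hs with rfl
    exact hr
  · intro hr
    induction hr with
    | refl =>
      exact pvSat_grows arcs _ source ((PySem.Set.mem_ofList _ _).2 (List.mem_singleton.2 rfl))
    | tail _ hstep ih => exact pvSat_closed arcs _ _ hstep ih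

lemma pvReach_iff (capacities flow_solution : List (Int × Int × Int)) (source x : Int) :
    x ∈ pvDFS (pvResidual capacities flow_solution) [source] PySem.Set.empty ↔
      x ∈ pvSaturate (pvArcs capacities flow_solution) (PySem.Set.ofList [source]) := by
  rw [pvDFS_iff, pvSat_iff]
  constructor
  · exact Relation.ReflTransGen.mono (fun a b h => (pvArcs_residual capacities flow_solution a b).1 h)
  · exact Relation.ReflTransGen.mono (fun a b h => (pvArcs_residual capacities flow_solution a b).2 h)

-- ===== VERDICT (by name: the statement is the Claim_ definition above) =====
lemma find_min_cut_eq (graph : List (Int × Int)) (capacities : List (Int × Int × Int))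
    (flow_solution : List (Int × Int × Int)) (source : Int) :
    find_min_cut graph capacities flow_solution source =
      graph.foldl (fun min_cut uv =>
        if (pvDFS (pvResidual capacities flow_solution) [source] PySem.Set.empty).contains uv.1 &&
            !(pvDFS (pvResidual capacities flow_solution) [source] PySem.Set.empty).contains uv.2
        then min_cut ++ [uv] else min_cut) [] := rfl

lemma find_min_cut_alt_eq (graph : List (Int × Int)) (capacities : List (Int × Int × Int))
    (flow_solution : List (Int × Int × Int)) (source : Int) :
    find_min_cut_alt graph capacities flow_solution source =
      graph.filter (fun uv =>
        (pvSaturate (pvArcs capacities flow_solution) (PySem.Set.ofList [source])).contains uv.1 &&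
          !(pvSaturate (pvArcs capacities flow_solution) (PySem.Set.ofList [source])).contains uv.2) := rfl

theorem find_min_cut_spec : Claim_equal_find_min_cut := by
  intro graph capacities flow_solution source _
  unfold Spec_find_min_cut
  rw [find_min_cut_eq, find_min_cut_alt_eq]
  simp only [PySem.List.foldl_append_if, List.nil_append, List.map_id']
  apply List.filter_congr
  intro uv _
  have hmem : ∀ y : Int,
      (pvDFS (pvResidual capacities flow_solution) [source] PySem.Set.empty).contains y =
      (pvSaturate (pvArcs capacities flow_solution) (PySem.Set.ofList [source])).contains y := by
    intro y
    rw [Bool.eq_iff_iff, pvContains_iff, pvContains_iff]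
    exact pvReach_iff capacities flow_solution source y
  rw [hmem, hmem]
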